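-- pv_equiv track=rewrite | github.com/eepp/yactfr | tools/genoddintitertest.py | _gen_bytes_be
-- ===== SOURCE A (Python) =====
-- def _value_to_bits(value, size):
--     bits = format(abs(value), 'b')
--     bits = '0' * (size - len(bits)) + bits
--
--     if value < 0:
--         comp_bits = ''
--
--         for bit in bits:
--             comp_bits += '1' if bit == '0' else '0'
--
--         comp_value = int(comp_bits, 2)
--         comp_value += 1
--         bits = format(comp_value, 'b')
--
--     assert(len(bits) == size)
--     return bits
--
-- def _gen_bytes_be(at, size, value):
--     bytes = []
--     byte = '1' * at
--     assert(len(byte) < 8)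
--     bits = _value_to_bits(value, size)
--
--     for bit in bits:
--         byte += bit
--
--         if len(byte) == 8:
--             bytes.append(byte)
--             byte = ''
--
--     if len(byte) > 0:
--         byte += '1' * (8 - len(byte))
--         bytes.append(byte)
--
--     return bytes
-- ===== SOURCE B (Python) =====
-- # B: construct the whole bit string once (two's complement via modular arithmetic for
-- # negatives), pad it on the right to a multiple of 8, and slice it into bytes.
-- def _value_to_bits(value, size):
--     if value < 0:
--         bits = format(value % (1 << size), 'b')
--     else:
--         bits = format(value, 'b').zfill(size)
--     assert len(bits) == size
--     return bits
--
-- def _gen_bytes_be(at, size, value):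
--     assert at < 8
--     all_bits = '1' * at + _value_to_bits(value, size)
--     rem = len(all_bits) % 8
--     if rem:
--         all_bits += '1' * (8 - rem)
--     return [all_bits[i:i + 8] for i in range(0, len(all_bits), 8)]
-- ===== Notes on version B (the rewrite author's own statement) =====
-- stated objective: simpler
-- what changed: B builds the complete bit string once (computing two's complement arithmetically as value % (1 << size) instead of A's flip-each-bit-and-add-one string loop), right-pads it to a multiple of 8 and slices it into 8-char chunks, replacing A's accumulate-into-byte-and-flush-at-8 loop.
import Mathlib
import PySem

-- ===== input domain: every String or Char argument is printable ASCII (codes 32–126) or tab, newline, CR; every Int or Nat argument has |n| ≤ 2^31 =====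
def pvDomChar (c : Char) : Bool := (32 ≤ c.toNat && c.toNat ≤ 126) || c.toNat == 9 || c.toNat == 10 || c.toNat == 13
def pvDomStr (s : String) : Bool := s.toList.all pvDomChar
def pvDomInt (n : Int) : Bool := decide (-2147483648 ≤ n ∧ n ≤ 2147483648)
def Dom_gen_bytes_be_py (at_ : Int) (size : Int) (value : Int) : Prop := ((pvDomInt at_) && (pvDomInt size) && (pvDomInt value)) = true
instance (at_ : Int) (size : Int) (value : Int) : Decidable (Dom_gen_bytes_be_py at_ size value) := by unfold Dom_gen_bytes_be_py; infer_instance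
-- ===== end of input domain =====

-- B builds the whole bit string once (two's complement arithmetically, right-pad to a
-- multiple of 8, slice into bytes) instead of A's flip-each-bit and flush-at-8 loop: simpler.

-- ===== PORT A =====

-- int(cs, 2): hand-ported digit fold; exact on the nonempty all-'0'/'1' strings A applies it to
def pvBitv (c : Char) : Nat := if c = '1' then 1 else 0
def pvBinToNat (cs : List Char) : Nat := cs.foldl (fun a c => 2 * a + pvBitv c) 0

-- _value_to_bits; the 'assert len(bits) == size' passes on every input admitted by Pre_
def value_to_bits_py (value : Int) (size : Int) : List Char :=
  let bits := PySem.Int.toBinChars ((value.natAbs : Int))                  -- format(abs(value), 'b')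
  let bits := List.replicate (size - (bits.length : Int)).toNat '0' ++ bits -- '0' * (size - len(bits)) + bits
  if value < 0 then
    let comp_bits := bits.foldl (fun acc c => acc ++ [if c = '0' then '1' else '0']) []
    let comp_value := pvBinToNat comp_bits + 1                             -- int(comp_bits, 2) + 1
    PySem.Int.toBinChars ((comp_value : Int))                              -- format(comp_value, 'b')
  else bits

-- the loop body of the 'for bit in bits' accumulation
def pvStep (s : List String × List Char) (bit : Char) : List String × List Char :=
  let byte := s.2 ++ [bit]
  if byte.length = 8 then (s.1 ++ [String.ofList byte], ([] : List Char)) else (s.1, byte)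

-- the 'assert len(byte) < 8' passes on every input admitted by Pre_
def gen_bytes_be_py (at_ : Int) (size : Int) (value : Int) : List String :=
  let byte0 : List Char := List.replicate at_.toNat '1'                    -- '1' * at
  let bits := value_to_bits_py value size
  let st := bits.foldl pvStep (([] : List String), byte0)
  if 0 < st.2.length then st.1 ++ [String.ofList (st.2 ++ List.replicate (8 - st.2.length) '1')] else st.1

-- ===== PORT B =====

-- B's _value_to_bits; '1 << size' needs 0 ≤ size (guaranteed by Pre_), ported as <<< on size.toNat
def value_to_bits_alt (value : Int) (size : Int) : List Char :=
  if value < 0 then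
    PySem.Int.toBinChars (PySem.Int.mod value ((1 : Int) <<< size.toNat))  -- format(value % (1 << size), 'b')
  else
    let b := PySem.Int.toBinChars value
    List.replicate (size - (b.length : Int)).toNat '0' ++ b                -- format(value, 'b').zfill(size): value ≥ 0, no sign char

-- [all_bits[i:i+8] for i in range(0, len(all_bits), 8)]
def chunk8 (l : List Char) : List String :=
  if h : l = [] then [] else String.ofList (l.take 8) :: chunk8 (l.drop 8)
termination_by l.length
decreasing_by
  have hp : 0 < l.length := List.length_pos_of_ne_nil h
  simp; omega

def gen_bytes_be_py_alt (at_ : Int) (size : Int) (value : Int) : List String :=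
  let all_bits := List.replicate at_.toNat '1' ++ value_to_bits_alt value size
  let rem := all_bits.length % 8
  let padded := if rem ≠ 0 then all_bits ++ List.replicate (8 - rem) '1' else all_bits
  chunk8 padded

-- ===== PRECONDITION & SPEC =====
-- Pre_ is exactly the set of inputs on which A's three asserts pass (A raises AssertionError
-- elsewhere): '1'*at shorter than 8, and the produced bit string has length exactly size.
def Pre_gen_bytes_be_py (at_ : Int) (size : Int) (value : Int) : Prop :=
  at_ < 8 ∧ 1 ≤ size ∧
  (if 0 ≤ value then value < 2 ^ size.toNat
   else 2 ^ (size.toNat - 1) ≤ 2 ^ (max size.toNat (PySem.Int.bitLength value)) - value.natAbs ∧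
        2 ^ (max size.toNat (PySem.Int.bitLength value)) - value.natAbs < 2 ^ size.toNat)
instance (at_ : Int) (size : Int) (value : Int) : Decidable (Pre_gen_bytes_be_py at_ size value) := by
  unfold Pre_gen_bytes_be_py; infer_instance

def pvWitness_gen_bytes_be_py : Int × Int × Int := (2, 4, -3)

def Spec_gen_bytes_be_py (at_ : Int) (size : Int) (value : Int) (out : List String) : Prop := out = gen_bytes_be_py_alt at_ size value
instance (at_ : Int) (size : Int) (value : Int) (out : List String) : Decidable (Spec_gen_bytes_be_py at_ size value out) := by unfold Spec_gen_bytes_be_py; infer_instance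

-- ===== CLAIM (what is proved, stated in full; the proofs are below) =====
def Claim_equal_gen_bytes_be_py : Prop := ∀ (at_ : Int) (size : Int) (value : Int), Dom_gen_bytes_be_py at_ size value → Pre_gen_bytes_be_py at_ size value → Spec_gen_bytes_be_py at_ size value (gen_bytes_be_py at_ size value)

-- ===== LEMMAS AND PROOFS =====

-- a reference big-endian binary writer: pvToBin n = format(n, 'b') for n : Nat
def pvToBinAux (n : Nat) : List Char :=
  if n = 0 then [] else pvToBinAux (n / 2) ++ [if n % 2 = 1 then '1' else '0']
termination_by n
decreasing_by exact Nat.div_lt_self (Nat.pos_of_ne_zero (by assumption)) (by norm_num)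

def pvToBin (n : Nat) : List Char := if n = 0 then ['0'] else pvToBinAux n

lemma toDigitsCore_eq_pvToBin : ∀ (fuel n : Nat) (ds : List Char), n < fuel →
    Nat.toDigitsCore 2 fuel n ds = pvToBin n ++ ds := by
  intro fuel
  induction fuel with
  | zero => intro n ds h; omega
  | succ f ih =>
    intro n ds _
    by_cases h0 : n = 0
    · subst h0; simp [Nat.toDigitsCore, pvToBin, Nat.digitChar]
    · rw [Nat.toDigitsCore]
      by_cases h2 : n / 2 = 0
      · simp [h2, pvToBin, h0, pvToBinAux, Nat.digitChar]
        have : n = 1 := by omega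
        subst this; decide
      · have hlt : n / 2 < f := by omega
        rw [ih (n/2) _ hlt]
        simp only [if_neg h2]
        conv_rhs => rw [pvToBin, if_neg h0, pvToBinAux, if_neg h0]
        rw [pvToBin, if_neg h2]
        simp only [List.append_assoc, List.singleton_append]
        rcases Nat.mod_two_eq_zero_or_one n with h | h <;> simp [h, Nat.digitChar]

lemma toBinChars_ofNat (n : Nat) : PySem.Int.toBinChars (n : Int) = pvToBin n := by
  have h1 : ¬ ((n : Int) < 0) := by omega
  simp [PySem.Int.toBinChars, h1, Nat.toDigits]
  rw [toDigitsCore_eq_pvToBin (n+1) n [] (by omega)]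
  simp

lemma pvToBinAux_ne_nil {n : Nat} (h : n ≠ 0) : pvToBinAux n ≠ [] := by
  rw [pvToBinAux, if_neg h]
  simp

lemma pvToBinAux_isBin : ∀ (n : Nat), ∀ c ∈ pvToBinAux n, c = '0' ∨ c = '1' := by
  intro n
  induction n using Nat.strong_induction_on with
  | _ n ih =>
    by_cases h0 : n = 0
    · subst h0; intro c hc; simp [pvToBinAux] at hc
    · rw [pvToBinAux, if_neg h0]
      intro c hc
      rcases List.mem_append.mp hc with h | h
      · exact ih (n/2) (Nat.div_lt_self (by omega) (by omega)) c h
      · simp at h; subst h; split <;> simp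

lemma pvBinToNat_from (cs : List Char) : ∀ a : Nat,
    cs.foldl (fun a c => 2 * a + pvBitv c) a = a * 2 ^ cs.length + pvBinToNat cs := by
  induction cs with
  | nil => intro a; simp [pvBinToNat]
  | cons c t ih =>
    intro a
    simp only [List.foldl_cons, List.length_cons]
    rw [ih (2 * a + pvBitv c)]
    have : pvBinToNat (c :: t) = (2 * 0 + pvBitv c) * 2 ^ t.length + pvBinToNat t := by
      rw [pvBinToNat, List.foldl_cons, ih (2 * 0 + pvBitv c)]
    rw [this]; ring

lemma pvBinToNat_cons (c : Char) (t : List Char) :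
    pvBinToNat (c :: t) = pvBitv c * 2 ^ t.length + pvBinToNat t := by
  calc pvBinToNat (c :: t)
      = List.foldl (fun a c => 2 * a + pvBitv c) (2 * 0 + pvBitv c) t := rfl
    _ = (2 * 0 + pvBitv c) * 2 ^ t.length + pvBinToNat t := pvBinToNat_from t _
    _ = pvBitv c * 2 ^ t.length + pvBinToNat t := by ring

lemma pvBinToNat_pvToBinAux : ∀ n : Nat, pvBinToNat (pvToBinAux n) = n := by
  intro n
  induction n using Nat.strong_induction_on with
  | _ n ih =>
    by_cases h0 : n = 0
    · subst h0; simp [pvToBinAux, pvBinToNat]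
    · rw [pvToBinAux, if_neg h0]
      rw [pvBinToNat, List.foldl_append]
      rw [show (List.foldl (fun a c => 2 * a + pvBitv c) 0 (pvToBinAux (n / 2))) = pvBinToNat (pvToBinAux (n/2)) from rfl]
      rw [ih (n/2) (Nat.div_lt_self (by omega) (by omega))]
      simp only [List.foldl_cons, List.foldl_nil]
      rcases Nat.mod_two_eq_zero_or_one n with h | h <;> simp [h, pvBitv] <;> omega

lemma pvBinToNat_lt {cs : List Char} (h : ∀ c ∈ cs, c = '0' ∨ c = '1') :
    pvBinToNat cs < 2 ^ cs.length := by
  induction cs with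
  | nil => simp [pvBinToNat]
  | cons c t ih =>
    rw [pvBinToNat_cons]
    have h1 : pvBitv c ≤ 1 := by unfold pvBitv; split <;> omega
    have h2 : pvBinToNat t < 2 ^ t.length := ih (fun c hc => h c (List.mem_cons_of_mem _ hc))
    simp only [List.length_cons, pow_succ]
    nlinarith

lemma pvToBinAux_lower : ∀ n : Nat, n ≠ 0 → 2 ^ ((pvToBinAux n).length - 1) ≤ n := by
  intro n
  induction n using Nat.strong_induction_on with
  | _ n ih =>
    intro h0
    rw [pvToBinAux, if_neg h0]
    by_cases h2 : n / 2 = 0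
    · simp [h2, pvToBinAux]; omega
    · have hlen : (pvToBinAux (n / 2)).length ≠ 0 := by
        simpa using pvToBinAux_ne_nil h2
      have := ih (n/2) (Nat.div_lt_self (by omega) (by omega)) h2
      simp only [List.length_append, List.length_singleton]
      have hpow : 2 ^ ((pvToBinAux (n / 2)).length + 1 - 1) = 2 * 2 ^ ((pvToBinAux (n / 2)).length - 1) := by
        rw [Nat.add_sub_cancel, ← pow_succ']
        congr 1; omega
      rw [hpow]; omega

lemma pvToBinAux_length {n : Nat} (h : n ≠ 0) :
    (pvToBinAux n).length = PySem.Int.bitLength (n : Int) := by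
  have hub : (n : Nat) < 2 ^ (pvToBinAux n).length := by
    have := pvBinToNat_lt (pvToBinAux_isBin n)
    rwa [pvBinToNat_pvToBinAux] at this
  have hlb := pvToBinAux_lower n h
  have hbu := PySem.Int.lt_two_pow_bitLength (n : Int)
  have hbl := PySem.Int.two_pow_bitLength_le (n : Int) (by exact_mod_cast h)
  rw [Int.natAbs_natCast] at hbu hbl
  have h1 : (pvToBinAux n).length - 1 < PySem.Int.bitLength (n : Int) := by
    rw [← Nat.pow_lt_pow_iff_right (a := 2) (by omega)]; omega
  have h2 : PySem.Int.bitLength (n : Int) - 1 < (pvToBinAux n).length := by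
    rw [← Nat.pow_lt_pow_iff_right (a := 2) (by omega)]; omega
  have hne := pvToBinAux_ne_nil h
  have : (pvToBinAux n).length ≠ 0 := by simpa using hne
  omega

lemma pvBinToNat_replicate_zero (k : Nat) (bs : List Char) :
    pvBinToNat (List.replicate k '0' ++ bs) = pvBinToNat bs := by
  induction k with
  | zero => simp
  | succ m ih =>
    rw [List.replicate_succ, List.cons_append, pvBinToNat_cons]
    simpa [pvBitv] using ih

lemma pvBinToNat_map_flip {bs : List Char} (h : ∀ c ∈ bs, c = '0' ∨ c = '1') :
    pvBinToNat (bs.map (fun c => if c = '0' then '1' else '0')) = 2 ^ bs.length - 1 - pvBinToNat bs := by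
  induction bs with
  | nil => simp [pvBinToNat]
  | cons c t ih =>
    simp only [List.map_cons]
    rw [pvBinToNat_cons, pvBinToNat_cons]
    have ht := ih (fun c hc => h c (List.mem_cons_of_mem _ hc))
    have hlt := pvBinToNat_lt (fun c hc => h c (List.mem_cons_of_mem _ hc))
    rw [ht]
    simp only [List.length_map, List.length_cons]
    rcases h c List.mem_cons_self with hc | hc <;>
      · subst hc
        simp [pvBitv, pow_succ]
        omega

lemma value_to_bits_eq (value size : Int) (h : Pre_gen_bytes_be_py 0 size value) :
    value_to_bits_py value size = value_to_bits_alt value size := by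
  obtain ⟨-, hs, hbr⟩ := h
  by_cases hv : 0 ≤ value
  · rw [if_pos hv] at hbr
    simp only [value_to_bits_py, value_to_bits_alt, Int.natAbs_of_nonneg hv,
      if_neg (show ¬ value < 0 by omega)]
  · push Not at hv
    rw [if_neg (by omega)] at hbr
    set a := value.natAbs with hadef
    have ha : 1 ≤ a := by omega
    have haI : (a : Int) = -value := by omega
    have hbits : PySem.Int.toBinChars ((a : Int)) = pvToBinAux a := by
      rw [toBinChars_ofNat, pvToBin, if_neg (by omega)]
    have hblv : PySem.Int.bitLength ((a : Int)) = PySem.Int.bitLength value := by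
      rw [haI, PySem.Int.bitLength_neg]
    set bl := PySem.Int.bitLength value with hbldef
    set sz := size.toNat with hszdef
    set L := max sz bl with hLdef
    have hlen : (pvToBinAux a).length = bl := by
      rw [pvToBinAux_length (by omega), hblv]
    have ha_lt_bl : a < 2 ^ bl := by
      have := PySem.Int.lt_two_pow_bitLength value
      omega
    have hLs : sz ≤ L := le_max_left _ _
    have ha_lt : a < 2 ^ L := lt_of_lt_of_le ha_lt_bl (Nat.pow_le_pow_right (by omega) (le_max_right _ _))
    obtain ⟨hlo, hhi⟩ := hbr
    -- the padded bit string and its facts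
    have hplen : (List.replicate (size - ((pvToBinAux a).length : Int)).toNat '0' ++ pvToBinAux a).length = L := by
      simp [hlen]; omega
    have hIsBin : ∀ c ∈ List.replicate (size - ((pvToBinAux a).length : Int)).toNat '0' ++ pvToBinAux a,
        c = '0' ∨ c = '1' := by
      intro c hc
      rcases List.mem_append.mp hc with hcm | hcm
      · left; exact List.eq_of_mem_replicate hcm
      · exact pvToBinAux_isBin a c hcm
    have hval : pvBinToNat (List.replicate (size - ((pvToBinAux a).length : Int)).toNat '0' ++ pvToBinAux a) = a := by
      rw [pvBinToNat_replicate_zero, pvBinToNat_pvToBinAux]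
    -- port A's branch
    simp only [value_to_bits_py, if_pos hv]
    simp only [← hadef, hbits]
    rw [PySem.List.foldl_append_singleton_eq_map (fun c => if c = '0' then '1' else '0')]
    rw [List.nil_append, pvBinToNat_map_flip hIsBin, hplen, hval]
    -- port B's branch
    simp only [value_to_bits_alt, if_pos hv]
    have h1s : (1 : Int) <<< sz = 2 ^ sz := by rw [Int.shiftLeft_eq, one_mul]
    have hmodI : PySem.Int.mod value ((1 : Int) <<< sz) = ((2 ^ L - a : Nat) : Int) := by
      rw [h1s, PySem.Int.mod_eq_emod_of_pos (by positivity)]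
      have key : value + (2 ^ sz : Int) * 2 ^ (L - sz) = ((2 ^ L - a : Nat) : Int) := by
        push_cast [Nat.cast_sub ha_lt.le]
        rw [← pow_add, (by omega : sz + (L - sz) = L)]
        linarith [haI]
      calc value % (2 : Int) ^ sz
          = (value + (2 ^ sz : Int) * 2 ^ (L - sz)) % 2 ^ sz := by
            rw [Int.add_mul_emod_self_left]
        _ = ((2 ^ L - a : Nat) : Int) % 2 ^ sz := by rw [key]
        _ = ((2 ^ L - a : Nat) : Int) := by
            apply Int.emod_eq_of_lt (by positivity)
            exact_mod_cast hhi
    rw [hmodI, toBinChars_ofNat]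
    rw [toBinChars_ofNat, pvToBin, if_neg (by omega), pvToBin, if_neg (by omega)]
    congr 1
    omega

def pvPad (l : List Char) : List Char :=
  if l.length % 8 ≠ 0 then l ++ List.replicate (8 - l.length % 8) '1' else l

lemma chunk8_cons {u : List Char} (r : List Char) (h : u.length = 8) :
    chunk8 (u ++ r) = String.ofList u :: chunk8 r := by
  have hne : u ++ r ≠ [] := by
    intro hc
    have := congrArg List.length hc
    simp [h] at this
  rw [chunk8, dif_neg hne]
  have h8 : (8 : Nat) = u.length := h.symm
  rw [h8, List.take_left, List.drop_left]

lemma pvPad_append8 {u : List Char} (r : List Char) (h : u.length = 8) :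
    pvPad (u ++ r) = u ++ pvPad r := by
  unfold pvPad
  have hlen : (u ++ r).length % 8 = r.length % 8 := by
    rw [List.length_append, h]; omega
  rw [hlen]
  split <;> simp [List.append_assoc]

lemma fold_chunks (bits : List Char) : ∀ (bytes : List String) (byte : List Char), byte.length < 8 →
    (let st := bits.foldl pvStep (bytes, byte);
     if 0 < st.2.length then st.1 ++ [String.ofList (st.2 ++ List.replicate (8 - st.2.length) '1')] else st.1)
    = bytes ++ chunk8 (pvPad (byte ++ bits)) := by
  induction bits with
  | nil =>
    intro bytes byte hb
    simp only [List.foldl_nil, List.append_nil]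
    by_cases h0 : byte = []
    · subst h0; simp [pvPad, chunk8]
    · have hlp : byte.length % 8 = byte.length := Nat.mod_eq_of_lt hb
      have hne : byte.length ≠ 0 := by simpa using h0
      have hpadlen : (byte ++ List.replicate (8 - byte.length % 8) '1').length = 8 := by
        simp [hlp]; omega
      simp only [pvPad, hlp, if_pos hne]
      rw [show (byte ++ List.replicate (8 - byte.length) '1')
            = (byte ++ List.replicate (8 - byte.length % 8) '1') ++ [] by simp [hlp]]
      rw [chunk8_cons [] hpadlen, chunk8, dif_pos rfl]
      simp [hne, Nat.pos_of_ne_zero, hlp]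
  | cons c t ih =>
    intro bytes byte hb
    simp only [List.foldl_cons]
    rw [show (byte ++ c :: t) = (byte ++ [c]) ++ t by simp]
    by_cases h8 : (byte ++ [c]).length = 8
    · have hstep : pvStep (bytes, byte) c = (bytes ++ [String.ofList (byte ++ [c])], ([] : List Char)) := by
        simp only [pvStep]; rw [if_pos h8]
      rw [hstep]
      rw [ih (bytes ++ [String.ofList (byte ++ [c])]) [] (by norm_num)]
      rw [pvPad_append8 t h8, chunk8_cons (pvPad t) h8]
      simp
    · have hstep : pvStep (bytes, byte) c = (bytes, byte ++ [c]) := by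
        simp only [pvStep]; rw [if_neg h8]
      rw [hstep]
      exact ih bytes (byte ++ [c]) (by simp at h8 ⊢; omega)

-- ===== VERDICT (by name: the statement is the Claim_ definition above) =====
theorem gen_bytes_be_py_spec : Claim_equal_gen_bytes_be_py := by
  unfold Claim_equal_gen_bytes_be_py
  intro at_ size value _ hpre
  unfold Spec_gen_bytes_be_py
  have h8 : at_ < 8 := hpre.1
  have hlt : (List.replicate at_.toNat '1').length < 8 := by
    simp; omega
  have hA := fold_chunks (value_to_bits_py value size) [] (List.replicate at_.toNat '1') hlt
  simp only [List.nil_append] at hA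
  show (let st := (value_to_bits_py value size).foldl pvStep (([] : List String), List.replicate at_.toNat '1');
        if 0 < st.2.length then st.1 ++ [String.ofList (st.2 ++ List.replicate (8 - st.2.length) '1')] else st.1)
      = gen_bytes_be_py_alt at_ size value
  rw [hA]
  rw [value_to_bits_eq value size ⟨by norm_num, hpre.2.1, hpre.2.2⟩]
  simp [gen_bytes_be_py_alt, pvPad]
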